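-- pv_equiv track=rewrite | github.com/Sawyer0/comply-ai | detector-orchestration/src/orchestration/ml/content_analyzer.py | _is_tabular
-- ===== SOURCE A (Python) =====
-- def _is_tabular(content: str) -> bool:
--     """Check if content is tabular."""
--     lines = content.split("\n")
--     if len(lines) < 2:
--         return False
--
--     # Check for consistent delimiters
--     delimiters = [",", "\t", "|", ";"]
--     for delimiter in delimiters:
--         if all(delimiter in line for line in lines[:5]):
--             return True
--
--     return False
-- ===== SOURCE B (Python) =====
-- def _is_tabular(content: str) -> bool:
--     """Check if content is tabular."""
--     lines = content.split("\n")
--     if len(lines) < 2: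
--         return False
--
--     # Shrink the candidate-delimiter set over a single traversal of the lines
--     candidates = {",", "\t", "|", ";"}
--     for line in lines[:5]:
--         candidates = {d for d in candidates if d in line}
--     return bool(candidates)
-- ===== Notes on version B (the rewrite author's own statement) =====
-- stated objective: alternative
-- what changed: Instead of testing each delimiter against all first-five lines (outer loop over delimiters, inner all() over lines), B maintains a shrinking candidate-delimiter set in one pass over lines[:5] and returns whether any candidate survives.
import Mathlib
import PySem

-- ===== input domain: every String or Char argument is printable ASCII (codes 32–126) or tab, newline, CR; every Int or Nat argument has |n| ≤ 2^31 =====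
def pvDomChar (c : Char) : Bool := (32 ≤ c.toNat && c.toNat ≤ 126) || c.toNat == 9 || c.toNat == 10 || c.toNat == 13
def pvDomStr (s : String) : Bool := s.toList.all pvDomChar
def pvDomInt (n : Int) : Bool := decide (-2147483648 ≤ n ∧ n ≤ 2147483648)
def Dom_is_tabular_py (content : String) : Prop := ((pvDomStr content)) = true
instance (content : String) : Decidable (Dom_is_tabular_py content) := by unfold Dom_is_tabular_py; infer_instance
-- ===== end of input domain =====

-- B replaces A's outer loop over delimiters (each re-scanning the first five lines)
-- by one pass over lines[:5] that shrinks a candidate-delimiter set; same result.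


-- ===== PORT A =====
def is_tabular_py (content : String) : Bool :=
  let lines := (PySem.Str.split? content "\n").getD []  -- sep ≠ "" so split? is some; .getD [] just unwraps
  if lines.length < 2 then false
  else
    -- 'for delimiter in delimiters: if all(...): return True' ≡ List.any; lines[:5] = take 5
    [",", "\t", "|", ";"].any fun delimiter =>
      (lines.take 5).all fun line => PySem.Str.isIn delimiter line

-- ===== PORT B =====
def is_tabular_py_alt (content : String) : Bool :=
  let lines := (PySem.Str.split? content "\n").getD []  -- sep ≠ "" so split? is some; .getD [] just unwraps
  if lines.length < 2 then false
  else
    let candidates := (lines.take 5).foldl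
      (fun cs line => cs.filter fun d => PySem.Str.isIn d line)
      (PySem.Set.ofList [",", "\t", "|", ";"])
    !candidates.isEmpty

-- ===== PRECONDITION & SPEC =====
def Spec_is_tabular_py (content : String) (out : Bool) : Prop := out = is_tabular_py_alt content
instance (content : String) (out : Bool) : Decidable (Spec_is_tabular_py content out) := by unfold Spec_is_tabular_py; infer_instance

-- ===== CLAIM (what is proved, stated in full; the proofs are below) =====
def Claim_equal_is_tabular_py : Prop := ∀ (content : String), Dom_is_tabular_py content → Spec_is_tabular_py content (is_tabular_py content)

-- ===== LEMMAS AND PROOFS =====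

-- Folding a filter over the lines equals filtering for "in all lines" at once.
theorem foldl_filter_eq_filter_all {α β : Type} (p : α → β → Bool) :
    ∀ (ls : List β) (ds : List α),
      ls.foldl (fun cs l => cs.filter fun d => p d l) ds
        = ds.filter fun d => ls.all fun l => p d l := by
  intro ls
  induction ls with
  | nil => intro ds; simp
  | cons l ls ih =>
    intro ds
    simp only [List.foldl_cons, ih, List.filter_filter, List.all_cons]
    congr 1
    funext d
    rw [Bool.and_comm]

theorem not_isEmpty_filter_eq_any {α : Type} (p : α → Bool) (ds : List α) :
    (!(ds.filter p).isEmpty) = ds.any p := by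
  induction ds with
  | nil => simp
  | cons d ds ih =>
    by_cases h : p d <;> simp [h, ih]

-- ===== VERDICT (by name: the statement is the Claim_ definition above) =====
theorem is_tabular_py_spec : Claim_equal_is_tabular_py := by
  intro content _
  unfold Spec_is_tabular_py is_tabular_py is_tabular_py_alt
  simp only
  split
  · rfl
  · rw [foldl_filter_eq_filter_all, not_isEmpty_filter_eq_any]
    rfl
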